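-- pv_equiv track=rewrite | github.com/rajpurohitritesh/PALB-1-Python-Programming | Ex5.7.py | maxPeople
-- ===== SOURCE A (Python) =====
-- def maxPeople(arr):
--     n = len(arr)
--
--     # Left visibility
--     left = [0] * n
--     stack = []
--
--     for i in range(n):
--         while stack and arr[stack[-1]] < arr[i]:
--             left[i] += 1
--             stack.pop()
--
--         if stack:
--             left[i] += 1
--
--         stack.append(i)
--
--     # Right visibility
--     right = [0] * n
--     stack = []
--
--     for i in range(n - 1, -1, -1):
--         while stack and arr[stack[-1]] < arr[i]:
--             right[i] += 1
--             stack.pop()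
--
--         if stack:
--             right[i] += 1
--
--         stack.append(i)
--
--     ans = 0
--     for i in range(n):
--         ans = max(ans, left[i] + right[i] + 1)
--
--     return ans
-- ===== SOURCE B (Python) =====
-- def _vis(h, people):
--     # people listed nearest-first; count how many of them h can see:
--     # someone is seen if no one between is taller; the first person at
--     # least as tall as h is seen but blocks everyone farther away.
--     c = 0
--     m = None
--     for x in people:
--         if m is None or x >= m:
--             c += 1
--             if x >= h:
--                 break
--             m = x
--     return c
--
-- def maxPeople(arr):
--     best = 0
--     for i in range(len(arr)):
--         see = 1 + _vis(arr[i], arr[:i][::-1]) + _vis(arr[i], arr[i+1:])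
--         best = max(best, see)
--     return best
-- ===== Notes on version B (the rewrite author's own statement) =====
-- stated objective: simpler
-- what changed: Replaces the two monotonic-stack passes plus a left/right table with direct per-index scans: for each person, walk outward in each direction keeping a running maximum, counting each person not shorter than the maximum and stopping at the first one at least as tall; no stacks or auxiliary arrays.
import Mathlib
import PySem

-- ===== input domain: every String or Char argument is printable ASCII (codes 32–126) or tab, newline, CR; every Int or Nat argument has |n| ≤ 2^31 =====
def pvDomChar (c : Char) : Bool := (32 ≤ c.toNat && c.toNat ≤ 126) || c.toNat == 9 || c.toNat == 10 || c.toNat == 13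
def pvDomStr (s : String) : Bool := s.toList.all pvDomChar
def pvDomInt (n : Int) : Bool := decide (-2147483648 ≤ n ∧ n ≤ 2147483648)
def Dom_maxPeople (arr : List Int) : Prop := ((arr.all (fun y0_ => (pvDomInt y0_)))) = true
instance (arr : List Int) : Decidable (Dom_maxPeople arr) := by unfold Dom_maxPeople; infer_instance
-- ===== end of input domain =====

-- B replaces A's two monotonic-stack passes by direct per-index outward scans (simpler: no stacks, no left/right tables).

-- ===== PORT A =====
-- 'while stack and arr[stack[-1]] < arr[i]: left[i] += 1; stack.pop()' — stack stored top-first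
-- (Python appends/pops at the right end); returns (number popped, remaining stack).
def popA (arr : List Int) (x : Int) : List Int → Int × List Int
  | [] => (0, [])
  | j :: rest =>
      if PySem.List.pyGetD arr j 0 < x then
        let r := popA arr x rest
        (r.1 + 1, r.2)
      else (0, j :: rest)

-- one iteration of the first loop: state = (left so far, stack); left[i] is assigned in increasing i, so append
def stepL (arr : List Int) (st : List Int × List Int) (i : Int) : List Int × List Int :=
  let x := PySem.List.pyGetD arr i 0
  let r := popA arr x st.2
  (st.1 ++ [r.1 + (if r.2 = [] then 0 else 1)], i :: r.2)

-- one iteration of the second loop: right[i] is assigned in decreasing i, so prepend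
def stepR (arr : List Int) (st : List Int × List Int) (i : Int) : List Int × List Int :=
  let x := PySem.List.pyGetD arr i 0
  let r := popA arr x st.2
  ((r.1 + (if r.2 = [] then 0 else 1)) :: st.1, i :: r.2)

def maxPeople (arr : List Int) : Int :=
  let n : Int := arr.length
  let left := ((PySem.List.pyRange 0 n 1).foldl (stepL arr) ([], [])).1
  let right := ((PySem.List.pyRange (n - 1) (-1) (-1)).foldl (stepR arr) ([], [])).1
  (PySem.List.pyRange 0 n 1).foldl
    (fun ans i => max ans (PySem.List.pyGetD left i 0 + PySem.List.pyGetD right i 0 + 1)) 0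

-- ===== PORT B =====
-- 'm is None or x >= m'
def pOk (m : Option Int) (x : Int) : Bool :=
  match m with
  | none => true
  | some mv => decide (mv ≤ x)

-- _vis(h, people): people listed nearest-first; running maximum m, count x when x >= m,
-- break (count and stop) at the first x >= h.
def visB (h : Int) : List Int → Option Int → Int
  | [], _ => 0
  | x :: rest, m =>
      if pOk m x then
        if h ≤ x then 1 else 1 + visB h rest (some x)
      else visB h rest m

def maxPeople_alt (arr : List Int) : Int :=
  (PySem.List.pyRange 0 (arr.length : Int) 1).foldl
    (fun best i =>
      let h := PySem.List.pyGetD arr i 0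
      -- arr[:i][::-1] : '[::-1]' is List.reverse (PySem.List.slice?_none_none_neg_one)
      let l := (PySem.List.slice arr none (some i)).reverse
      -- arr[i+1:]
      let r := PySem.List.slice arr (some (i + 1)) none
      max best (1 + visB h l none + visB h r none)) 0

-- ===== PRECONDITION & SPEC =====
def Spec_maxPeople (arr : List Int) (out : Int) : Prop := out = maxPeople_alt arr
instance (arr : List Int) (out : Int) : Decidable (Spec_maxPeople arr out) := by unfold Spec_maxPeople; infer_instance

-- ===== CLAIM (what is proved, stated in full; the proofs are below) =====
def Claim_equal_maxPeople : Prop := ∀ (arr : List Int), Dom_maxPeople arr → Spec_maxPeople arr (maxPeople arr)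

-- ===== LEMMAS AND PROOFS =====

-- values (nearest-first) of A's stack after processing a prefix, as a function of that prefix (nearest-first)
def stkv : List Int → List Int
  | [] => []
  | x :: rest => x :: (stkv rest).dropWhile (fun y => decide (y < x))

-- what one iteration of A adds to left/right, as a function of the stack's value list
def gv (s : List Int) (h : Int) : Int :=
  ((s.takeWhile (fun y => decide (y < h))).length : Int) +
    (if s.dropWhile (fun y => decide (y < h)) = [] then 0 else 1)

lemma popA_spec (arr : List Int) (x : Int) :
    ∀ st : List Int,
      (popA arr x st).1 =
        (((st.map (fun j => PySem.List.pyGetD arr j 0)).takeWhile (fun y => decide (y < x))).length : Int) ∧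
      (popA arr x st).2.map (fun j => PySem.List.pyGetD arr j 0) =
        (st.map (fun j => PySem.List.pyGetD arr j 0)).dropWhile (fun y => decide (y < x)) := by
  intro st
  induction st with
  | nil => simp [popA]
  | cons j rest ih =>
      by_cases h : PySem.List.pyGetD arr j 0 < x
      · simp [popA, h, ih.1, ih.2]
      · simp [popA, h]

lemma dropWhile_eq_filter_of_sorted :
    ∀ (l : List Int), l.Pairwise (· ≤ ·) → ∀ x : Int,
      l.dropWhile (fun y => decide (y < x)) = l.filter (fun y => decide (x ≤ y)) := by
  intro l
  induction l with
  | nil => simp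
  | cons a t ih =>
      intro hl x
      have ha := (List.pairwise_cons.mp hl).1
      have ht := (List.pairwise_cons.mp hl).2
      by_cases hax : a < x
      · have : ¬ x ≤ a := by omega
        simp [hax, this, ih ht x]
      · have hxa : x ≤ a := by omega
        have hfil : t.filter (fun y => decide (x ≤ y)) = t := by
          apply List.filter_eq_self.mpr
          intro y hy
          have := ha y hy
          simpa using by omega
        simp [hax, hxa, hfil]

lemma stkv_pairwise : ∀ l : List Int, (stkv l).Pairwise (· ≤ ·) := by
  intro l
  induction l with
  | nil => simp [stkv]
  | cons x rest ih =>
      rw [stkv]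
      refine List.pairwise_cons.mpr ⟨?_, ih.sublist (List.dropWhile_sublist _)⟩
      intro y hy
      rw [dropWhile_eq_filter_of_sorted _ ih] at hy
      simpa using List.of_mem_filter hy

lemma visB_eq (h : Int) :
    ∀ (l : List Int) (m : Option Int), visB h l m = gv ((stkv l).filter (pOk m)) h := by
  intro l
  induction l with
  | nil => intro m; simp [visB, stkv, gv]
  | cons x rest ih =>
      intro m
      have hs := stkv_pairwise rest
      have hstk : stkv (x :: rest) = x :: (stkv rest).filter (fun y => decide (x ≤ y)) := by
        rw [stkv, dropWhile_eq_filter_of_sorted _ hs]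
      cases hm : pOk m x with
      | false =>
          obtain ⟨mv, rfl⟩ : ∃ mv, m = some mv := by
            cases m with
            | none => simp [pOk] at hm
            | some mv => exact ⟨mv, rfl⟩
          have hmv : ¬ mv ≤ x := by simpa [pOk] using hm
          have hfil : (stkv (x :: rest)).filter (pOk (some mv)) = (stkv rest).filter (pOk (some mv)) := by
            rw [hstk, List.filter_cons, hm]
            simp only [List.filter_filter]
            apply List.filter_congr
            intro a _
            by_cases hma : mv ≤ a
            · have : x ≤ a := by omega
              simp [pOk, hma, this]
            · simp [pOk, hma]
          rw [hfil, visB]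
          simp only [hm, Bool.false_eq_true, if_false]
          exact ih (some mv)
      | true =>
          have hkeep : (stkv (x :: rest)).filter (pOk m) =
              x :: (stkv rest).filter (fun y => decide (x ≤ y)) := by
            rw [hstk, List.filter_cons, hm]
            simp only [List.filter_filter, if_true]
            congr 1
            apply List.filter_congr
            intro a _
            by_cases hxa : x ≤ a
            · have : pOk m a = true := by
                cases m with
                | none => rfl
                | some mv =>
                    have hmx : mv ≤ x := by simpa [pOk] using hm
                    simp [pOk]; omega
              simp [hxa, this]
            · simp [hxa]
          rw [hkeep, visB]
          simp only [hm, if_true]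
          by_cases hy : h ≤ x
          · have : ¬ x < h := by omega
            simp [hy, gv, this]
          · have hxh : x < h := by omega
            simp only [hy, if_false]
            rw [ih (some x)]
            have hpok : pOk (some x) = fun y => decide (x ≤ y) := rfl
            simp [gv, hxh, hpok]
            ring

def fL (arr : List Int) (k : Nat) : Int := gv (stkv ((arr.take k).reverse)) (arr.getD k 0)
def fR (arr : List Int) (k : Nat) : Int := gv (stkv (arr.drop (k + 1))) (arr.getD k 0)

lemma loopL (arr : List Int) :
    ∀ k : Nat, k ≤ arr.length →
      ((PySem.List.pyRange 0 (k : Int) 1).foldl (stepL arr) ([], [])).1 = (List.range k).map (fL arr) ∧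
      ((PySem.List.pyRange 0 (k : Int) 1).foldl (stepL arr) ([], [])).2.map (fun j => PySem.List.pyGetD arr j 0) =
        stkv ((arr.take k).reverse) := by
  intro k
  induction k with
  | zero => intro _; simp [PySem.List.pyRange_one_eq_nil, stkv]
  | succ k ih =>
      intro hk
      have hlt : k < arr.length := hk
      obtain ⟨ih1, ih2⟩ := ih (Nat.le_of_succ_le hk)
      have hcast : ((k + 1 : Nat) : Int) = (k : Int) + 1 := by push_cast; ring
      rw [hcast, PySem.List.pyRange_one_succ_right (by positivity), List.foldl_append,
        List.foldl_cons, List.foldl_nil]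
      set st := (PySem.List.pyRange 0 (k : Int) 1).foldl (stepL arr) ([], []) with hst
      have hpop := popA_spec arr (PySem.List.pyGetD arr (k : Int) 0) st.2
      have hnil : ((popA arr (PySem.List.pyGetD arr (k : Int) 0) st.2).2 = []) ↔
          ((stkv ((arr.take k).reverse)).dropWhile
            (fun y => decide (y < PySem.List.pyGetD arr (k : Int) 0)) = []) := by
        rw [← List.map_eq_nil_iff (f := fun j => PySem.List.pyGetD arr j 0), hpop.2, ih2]
      have hv : PySem.List.pyGetD arr ((k : Nat) : Int) 0 = arr[k] := by
        rw [PySem.List.pyGetD_natCast]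
        exact List.getD_eq_getElem _ _ hlt
      constructor
      · simp only [stepL]
        rw [hpop.1, ih2, ih1, List.range_succ, List.map_append, List.map_singleton]
        congr 1
        simp only [hnil]
        simp [fL, gv, hv, List.getElem?_eq_getElem hlt]
      · simp only [stepL, List.map_cons]
        rw [hpop.2, ih2, List.take_succ_eq_append_getElem hlt, List.reverse_append]
        simp [stkv, hv]

lemma loopR (arr : List Int) :
    ∀ k : Nat, k ≤ arr.length → ∀ (acc st : List Int),
      st.map (fun j => PySem.List.pyGetD arr j 0) = stkv (arr.drop k) →
      ((PySem.List.pyRange ((k : Int) - 1) (-1) (-1)).foldl (stepR arr) (acc, st)).1 =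
        (List.range k).map (fR arr) ++ acc := by
  intro k
  induction k with
  | zero =>
      intro _ acc st hst
      simp
  | succ k ih =>
      intro hk acc st hst
      have hlt : k < arr.length := hk
      have hcast : ((k + 1 : Nat) : Int) - 1 = (k : Int) := by push_cast; ring
      rw [hcast, PySem.List.pyRange_neg_one_cons (by omega), List.foldl_cons]
      have hpop := popA_spec arr (PySem.List.pyGetD arr (k : Int) 0) st
      have hnil : ((popA arr (PySem.List.pyGetD arr (k : Int) 0) st).2 = []) ↔
          ((stkv (arr.drop (k + 1))).dropWhile
            (fun y => decide (y < PySem.List.pyGetD arr (k : Int) 0)) = []) := by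
        rw [← List.map_eq_nil_iff (f := fun j => PySem.List.pyGetD arr j 0), hpop.2, hst]
      have hv : PySem.List.pyGetD arr ((k : Nat) : Int) 0 = arr[k] := by
        rw [PySem.List.pyGetD_natCast]
        exact List.getD_eq_getElem _ _ hlt
      have hstep : stepR arr (acc, st) (k : Int) =
          (fR arr k :: acc, (k : Int) :: (popA arr (PySem.List.pyGetD arr (k : Int) 0) st).2) := by
        simp only [stepR]
        rw [hpop.1, hst]
        simp only [hnil]
        simp [fR, gv, hv, List.getElem?_eq_getElem hlt]
      rw [hstep, ih (Nat.le_of_succ_le hk) (fR arr k :: acc)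
        ((k : Int) :: (popA arr (PySem.List.pyGetD arr (k : Int) 0) st).2)
        (by rw [List.map_cons, hpop.2, hst, List.drop_eq_getElem_cons hlt]
            simp [stkv, hv])]
      rw [List.range_succ, List.map_append]
      simp

-- ===== VERDICT (by name: the statement is the Claim_ definition above) =====
theorem maxPeople_spec : Claim_equal_maxPeople := by
  unfold Claim_equal_maxPeople
  intro arr _
  unfold Spec_maxPeople maxPeople maxPeople_alt
  obtain ⟨hL, -⟩ := loopL arr arr.length le_rfl
  have hR := loopR arr arr.length le_rfl [] [] (by simp [List.drop_length, stkv])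
  rw [List.append_nil] at hR
  simp only []
  rw [hL, hR]
  apply PySem.List.foldl_congr_mem
  intro acc i hi
  rw [PySem.List.mem_pyRange_one] at hi
  obtain ⟨h0, hltI⟩ := hi
  obtain ⟨k, rfl⟩ : ∃ k : Nat, i = (k : Int) := ⟨i.toNat, (Int.toNat_of_nonneg h0).symm⟩
  have hk : k < arr.length := by exact_mod_cast hltI
  have hsl1 : PySem.List.slice arr none (some ((k : Nat) : Int)) = arr.take k :=
    PySem.List.slice_to_natCast arr k
  have hsl2 : PySem.List.slice arr (some (((k : Nat) : Int) + 1)) none = arr.drop (k + 1) := by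
    have := PySem.List.slice_from_natCast arr (k + 1)
    rwa [show (((k + 1 : Nat)) : Int) = ((k : Nat) : Int) + 1 by push_cast; ring] at this
  rw [PySem.List.pyGetD_natCast, PySem.List.pyGetD_natCast,
    PySem.List.getD_map_range _ _ _ _ hk, PySem.List.getD_map_range _ _ _ _ hk,
    hsl1, hsl2, visB_eq, visB_eq]
  have hnone : pOk none = fun _ : Int => true := rfl
  rw [hnone, List.filter_true, List.filter_true]
  simp only [fL, fR, PySem.List.pyGetD_natCast]
  congr 1
  ring
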